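-- pv_equiv track=rewrite | github.com/Allrounder18x/Final-Game | DATA/cricket_manager/utils/validators.py | validate_scorecard
-- ===== SOURCE A (Python) =====
-- def validate_scorecard(scorecard):
--     """
--     Validate scorecard dictionary
--
--     Args:
--         scorecard: Scorecard dictionary
--
--     Returns:
--         Tuple of (is_valid, errors_list)
--     """
--     errors = []
--
--     # Required fields
--     if 'innings' not in scorecard:
--         errors.append("Missing innings data")
--         return False, errors
--
--     # Validate each innings
--     for idx, innings in enumerate(scorecard['innings']):
--         if 'batting_team' not in innings:
--             errors.append(f"Innings {idx+1}: Missing batting team")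
--
--         if 'bowling_team' not in innings:
--             errors.append(f"Innings {idx+1}: Missing bowling team")
--
--         if 'total_runs' not in innings:
--             errors.append(f"Innings {idx+1}: Missing total runs")
--
--         if 'wickets' not in innings:
--             errors.append(f"Innings {idx+1}: Missing wickets")
--
--         if 'overs' not in innings:
--             errors.append(f"Innings {idx+1}: Missing overs")
--
--     return len(errors) == 0, errors
-- ===== SOURCE B (Python) =====
-- _REQUIRED = [
--     ('batting_team', 'Missing batting team'),
--     ('bowling_team', 'Missing bowling team'),
--     ('total_runs', 'Missing total runs'),
--     ('wickets', 'Missing wickets'),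
--     ('overs', 'Missing overs'),
-- ]
--
--
-- def _errors(innings_list, n):
--     """Recursively collect error messages, numbering innings from n."""
--     if not innings_list:
--         return []
--     head = innings_list[0]
--     present = frozenset(head)  # one scan over the innings' own keys
--     msgs = [f"Innings {n}: {label}" for key, label in _REQUIRED if key not in present]
--     return msgs + _errors(innings_list[1:], n + 1)
--
--
-- def validate_scorecard(scorecard):
--     if 'innings' not in scorecard:
--         return False, ["Missing innings data"]
--     errors = _errors(scorecard['innings'], 1)
--     return errors == [], errors
-- ===== Notes on version B (the rewrite author's own statement) =====
-- stated objective: alternative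
-- what changed: Replaces A's indexed loop that mutates an accumulator with five inline membership probes per innings by a structural recursion over the innings list carrying a 1-based counter, which builds a frozenset of each innings' own keys in one scan and emits the labels of required keys absent from that set, concatenating results back-to-front.
import Mathlib
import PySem

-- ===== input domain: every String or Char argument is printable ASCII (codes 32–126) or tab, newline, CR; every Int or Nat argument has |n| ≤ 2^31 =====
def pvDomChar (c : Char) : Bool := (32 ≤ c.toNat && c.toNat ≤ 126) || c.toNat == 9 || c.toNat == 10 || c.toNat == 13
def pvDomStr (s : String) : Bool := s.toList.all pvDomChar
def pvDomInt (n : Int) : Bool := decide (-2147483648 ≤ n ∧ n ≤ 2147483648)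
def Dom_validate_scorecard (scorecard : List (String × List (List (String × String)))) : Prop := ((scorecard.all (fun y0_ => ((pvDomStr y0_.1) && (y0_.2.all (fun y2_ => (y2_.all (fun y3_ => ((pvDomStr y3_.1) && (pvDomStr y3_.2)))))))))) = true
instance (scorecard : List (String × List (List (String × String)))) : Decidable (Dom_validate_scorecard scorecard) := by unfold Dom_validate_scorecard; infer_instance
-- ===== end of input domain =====

-- B replaces A's indexed loop of five inline membership probes by a structural recursion
-- over the innings list, carrying a 1-based counter and testing against a set of the
-- innings' own keys built in one scan — an idiomatic recursive decomposition, same cost.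


-- ===== PORT A =====
-- Python's 'k in d' on a dict, here an association list: the first-match lookup succeeds.
def pvIn {α : Type} (d : List (String × α)) (k : String) : Bool := (d.lookup k).isSome

def validate_scorecard (scorecard : List (String × List (List (String × String)))) : Bool × List String :=
  let errors : List String := []
  if !pvIn scorecard "innings" then
    let errors := errors ++ ["Missing innings data"]
    (false, errors)
  else
    let errors := (PySem.List.enumerate ((scorecard.lookup "innings").getD [])).foldl
      (fun errors p =>
        let idx := p.1
        let innings := p.2
        let errors := if !pvIn innings "batting_team" then
            errors ++ ["Innings " ++ PySem.Int.toStr (idx + 1) ++ ": Missing batting team"] else errors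
        let errors := if !pvIn innings "bowling_team" then
            errors ++ ["Innings " ++ PySem.Int.toStr (idx + 1) ++ ": Missing bowling team"] else errors
        let errors := if !pvIn innings "total_runs" then
            errors ++ ["Innings " ++ PySem.Int.toStr (idx + 1) ++ ": Missing total runs"] else errors
        let errors := if !pvIn innings "wickets" then
            errors ++ ["Innings " ++ PySem.Int.toStr (idx + 1) ++ ": Missing wickets"] else errors
        let errors := if !pvIn innings "overs" then
            errors ++ ["Innings " ++ PySem.Int.toStr (idx + 1) ++ ": Missing overs"] else errors
        errors) errors
  (decide (errors.length = 0), errors)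

-- ===== PORT B =====
def pvRequired : List (String × String) :=
  [("batting_team", "Missing batting team"),
   ("bowling_team", "Missing bowling team"),
   ("total_runs", "Missing total runs"),
   ("wickets", "Missing wickets"),
   ("overs", "Missing overs")]

-- _errors: structural recursion over the innings list, counter n 1-based;
-- frozenset(head) = set of the innings' keys.
def pvErrors : List (List (String × String)) → Int → List String
  | [], _ => []
  | head :: rest, n =>
    let present : PySem.Set String := PySem.Set.ofList (head.map Prod.fst)
    let msgs := (pvRequired.filter (fun f => !(PySem.Set.contains present f.1))).map
      (fun f => "Innings " ++ PySem.Int.toStr n ++ ": " ++ f.2)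
    msgs ++ pvErrors rest (n + 1)

def validate_scorecard_alt (scorecard : List (String × List (List (String × String)))) : Bool × List String :=
  if !pvIn scorecard "innings" then
    (false, ["Missing innings data"])
  else
    let errors := pvErrors ((scorecard.lookup "innings").getD []) 1
    (errors == [], errors)

-- ===== PRECONDITION & SPEC =====
def Spec_validate_scorecard (scorecard : List (String × List (List (String × String)))) (out : Bool × List String) : Prop := out = validate_scorecard_alt scorecard
instance (scorecard : List (String × List (List (String × String)))) (out : Bool × List String) : Decidable (Spec_validate_scorecard scorecard out) := by unfold Spec_validate_scorecard; infer_instance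

-- ===== CLAIM (what is proved, stated in full; the proofs are below) =====
def Claim_equal_validate_scorecard : Prop := ∀ (scorecard : List (String × List (List (String × String)))), Dom_validate_scorecard scorecard → Spec_validate_scorecard scorecard (validate_scorecard scorecard)

-- ===== LEMMAS AND PROOFS =====

-- membership in the key set = success of the first-match lookup
theorem pv_decide_keys (l : List (String × String)) (k : String) :
    decide (k ∈ PySem.Set.ofList (l.map Prod.fst)) = pvIn l k := by
  induction l with
  | nil => rfl
  | cons p rest ih =>
    by_cases h : p.1 = k
    · simp [pvIn, PySem.Set.mem_ofList, List.lookup, h]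
    · simp only [pvIn, PySem.Set.mem_ofList] at ih ⊢
      have hl : List.lookup k (p :: rest) = List.lookup k rest := by
        simp [List.lookup, beq_eq_false_iff_ne.mpr (Ne.symm h)]
      rw [hl, ← ih]
      simp [Ne.symm h]

-- splitting the literal tail of A's f-string into B's ": " ++ label
theorem pv_cat (s : String) (t u v : String) (h : t = u ++ v) : s ++ t = s ++ u ++ v := by
  rw [String.append_assoc, h]

-- A's enumerate-foldl, started at index n with accumulator errs, is errs ++ B's recursion from n+1
theorem pv_foldl_eq_pvErrors (l : List (List (String × String))) (n : Int) (errs : List String) :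
    (PySem.List.enumerate l n).foldl
      (fun errors p =>
        let idx := p.1
        let innings := p.2
        let errors := if !pvIn innings "batting_team" then
            errors ++ ["Innings " ++ PySem.Int.toStr (idx + 1) ++ ": Missing batting team"] else errors
        let errors := if !pvIn innings "bowling_team" then
            errors ++ ["Innings " ++ PySem.Int.toStr (idx + 1) ++ ": Missing bowling team"] else errors
        let errors := if !pvIn innings "total_runs" then
            errors ++ ["Innings " ++ PySem.Int.toStr (idx + 1) ++ ": Missing total runs"] else errors
        let errors := if !pvIn innings "wickets" then
            errors ++ ["Innings " ++ PySem.Int.toStr (idx + 1) ++ ": Missing wickets"] else errors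
        let errors := if !pvIn innings "overs" then
            errors ++ ["Innings " ++ PySem.Int.toStr (idx + 1) ++ ": Missing overs"] else errors
        errors) errs
    = errs ++ pvErrors l (n + 1) := by
  induction l generalizing n errs with
  | nil => simp [pvErrors]
  | cons inn rest ih =>
    rw [PySem.List.enumerate_cons]
    simp only [List.foldl_cons]
    rw [ih]
    cases h1 : pvIn inn "batting_team" <;> cases h2 : pvIn inn "bowling_team" <;>
      cases h3 : pvIn inn "total_runs" <;> cases h4 : pvIn inn "wickets" <;>
      cases h5 : pvIn inn "overs" <;>
      simp [pvErrors, pvRequired, List.filter, pv_decide_keys, h1, h2, h3, h4, h5,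
            List.append_assoc, add_comm n 1, add_assoc,
            pv_cat _ ": Missing batting team" ": " "Missing batting team" (by decide),
            pv_cat _ ": Missing bowling team" ": " "Missing bowling team" (by decide),
            pv_cat _ ": Missing total runs" ": " "Missing total runs" (by decide),
            pv_cat _ ": Missing wickets" ": " "Missing wickets" (by decide),
            pv_cat _ ": Missing overs" ": " "Missing overs" (by decide)]

-- ===== VERDICT (by name: the statement is the Claim_ definition above) =====
theorem validate_scorecard_spec : Claim_equal_validate_scorecard := by
  intro scorecard _
  unfold Spec_validate_scorecard validate_scorecard validate_scorecard_alt
  by_cases h : pvIn scorecard "innings"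
  case neg => simp [h]
  simp only [h, Bool.not_true, Bool.false_eq_true, if_false]
  rw [pv_foldl_eq_pvErrors]
  norm_num
  generalize pvErrors ((scorecard.lookup "innings").getD []) 1 = es
  cases es <;> simp
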